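-- pv_equiv track=rewrite | github.com/Likelion-HUFS-10th/Algorithm | 2팀/최성민/DP/거스름돈.py | f
-- ===== SOURCE A (Python) =====
-- def f(n):
-- 	five = n // 5
-- 	remain = n % 5
--
-- 	while five >= 0:
-- 		if remain % 2 == 0:
-- 			return five + (remain // 2)
--
-- 		five -= 1
-- 		remain += 5
--
-- 	return -1
-- ===== SOURCE B (Python) =====
-- def f(n):
--     # closed form / lookup table instead of A's borrow loop
--     if n < 0:
--         return -1
--     q, r = divmod(n, 5)
--     if r in (1, 3) and q == 0:
--         return -1
--     return q + (0, 2, 1, 3, 2)[r]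
-- ===== Notes on version B (the rewrite author's own statement) =====
-- stated objective: simpler
-- what changed: Replaces A's borrow-a-five while loop with a branchless closed form: a small lookup table of extra coins indexed by the remainder modulo five, plus one guard for negative and unreachable amounts.
import Mathlib
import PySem

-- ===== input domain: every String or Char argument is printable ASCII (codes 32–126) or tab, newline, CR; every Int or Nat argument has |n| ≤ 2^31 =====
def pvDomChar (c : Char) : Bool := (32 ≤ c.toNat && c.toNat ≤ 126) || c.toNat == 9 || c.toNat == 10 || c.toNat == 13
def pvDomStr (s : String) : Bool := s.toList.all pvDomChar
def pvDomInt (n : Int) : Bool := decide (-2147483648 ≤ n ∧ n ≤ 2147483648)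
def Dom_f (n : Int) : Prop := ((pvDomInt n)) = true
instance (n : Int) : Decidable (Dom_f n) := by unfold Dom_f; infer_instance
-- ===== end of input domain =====

-- B replaces A's borrow-a-five while loop by a closed-form table on n % 5 (objective: simpler).

-- ===== PORT A =====
-- the while loop: while five >= 0: if remain % 2 == 0: return five + remain//2; five -= 1; remain += 5
def loopA (five remain : Int) : Int :=
  if _h : five ≥ 0 then
    if PySem.Int.mod remain 2 = 0 then five + PySem.Int.floordiv remain 2
    else loopA (five - 1) (remain + 5)
  else -1
termination_by (five + 1).toNat
decreasing_by omega

def f (n : Int) : Int :=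
  loopA (PySem.Int.floordiv n 5) (PySem.Int.mod n 5)

-- ===== PORT B =====
def f_alt (n : Int) : Int :=
  if n < 0 then -1
  else
    let q := PySem.Int.floordiv n 5
    let r := PySem.Int.mod n 5
    if (r = 1 ∨ r = 3) ∧ q = 0 then -1
    -- tuple index (0,2,1,3,2)[r]; r is always in 0..4 here so the lookup is exact
    else q + (PySem.List.pyGet? ([0, 2, 1, 3, 2] : List Int) r).getD 0

-- ===== PRECONDITION & SPEC =====
def Spec_f (n : Int) (out : Int) : Prop := out = f_alt n
instance (n : Int) (out : Int) : Decidable (Spec_f n out) := by unfold Spec_f; infer_instance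

-- ===== CLAIM (what is proved, stated in full; the proofs are below) =====
def Claim_equal_f : Prop := ∀ (n : Int), Dom_f n → Spec_f n (f n)

-- ===== LEMMAS AND PROOFS =====

theorem f_eq (n : Int) : f n = f_alt n := by
  unfold f f_alt
  rw [PySem.Int.floordiv_eq_ediv_of_pos (by norm_num), PySem.Int.mod_eq_emod_of_pos (by norm_num)]
  rcases lt_or_ge n 0 with hneg | hpos
  · have hq : n / 5 < 0 := by omega
    rw [loopA]
    simp [hneg, not_le.mpr hq]
  · have hq : 0 ≤ n / 5 := Int.ediv_nonneg hpos (by norm_num)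
    have hr0 : 0 ≤ n % 5 := Int.emod_nonneg _ (by norm_num)
    have hr5 : n % 5 < 5 := Int.emod_lt_of_pos _ (by norm_num)
    have hc : n % 5 = 0 ∨ n % 5 = 1 ∨ n % 5 = 2 ∨ n % 5 = 3 ∨ n % 5 = 4 := by omega
    have hnn : ¬ n < 0 := not_lt.mpr hpos
    rcases hc with h | h | h | h | h <;> rw [h] <;> rw [loopA]
    · simp [hq, hnn, PySem.Int.mod, PySem.Int.floordiv, PySem.List.pyGet?, PySem.List.pyIdx?]
    · rcases eq_or_lt_of_le hq with hq0 | hq1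
      · rw [loopA]
        simp [← hq0, hnn]
      · rw [loopA]
        have h1 : (1:Int) % 2 ≠ 0 := by decide
        have h2 : n / 5 - 1 ≥ 0 := by omega
        have hq0 : ¬ (n / 5 = 0) := by omega
        simp [hq, hnn, hq0, PySem.Int.mod, PySem.Int.floordiv, PySem.List.pyGet?, PySem.List.pyIdx?]
        omega
    · simp [hq, hnn, PySem.Int.mod, PySem.Int.floordiv, PySem.List.pyGet?, PySem.List.pyIdx?]
    · rcases eq_or_lt_of_le hq with hq0 | hq1
      · rw [loopA]
        simp [← hq0, hnn]
      · rw [loopA]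
        have h2 : n / 5 - 1 ≥ 0 := by omega
        have hq0 : ¬ (n / 5 = 0) := by omega
        simp [hq, hnn, hq0, PySem.Int.mod, PySem.Int.floordiv, PySem.List.pyGet?, PySem.List.pyIdx?]
        omega
    · simp [hq, hnn, PySem.Int.mod, PySem.Int.floordiv, PySem.List.pyGet?, PySem.List.pyIdx?]

-- ===== VERDICT (by name: the statement is the Claim_ definition above) =====
theorem f_spec : Claim_equal_f := by
  intro n _
  exact f_eq n
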